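-- pv_equiv track=rewrite | github.com/8bllgrl/py-XIVAPI-DialogueScraper | finderV2.py | format_all_name_instances
-- ===== SOURCE A (Python) =====
-- def format_all_name_instances(full_list_of_name_instances):
--     # for v2
--     cutscene_occurrence = []
--     character_is_mentioned = []
--
--     formatter = ""
--
--     for name_instance in full_list_of_name_instances:
--         if "VOICEMAN" in name_instance:
--             cutscene_occurrence.append(name_instance)
--         else:
--             character_is_mentioned.append(name_instance)
--
--     for cutscene in cutscene_occurrence:
--         formatter += " " + cutscene + "\n"
--
--     formatter += "\n"
--
--     for character in character_is_mentioned: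
--         formatter += " " + character + "\n"
--
--     return formatter
-- ===== SOURCE B (Python) =====
-- def format_all_name_instances(full_list_of_name_instances):
--     # filter-and-join formulation: each group is a filtered comprehension joined at once
--     return ("".join(" " + n + "\n" for n in full_list_of_name_instances if "VOICEMAN" in n)
--             + "\n"
--             + "".join(" " + n + "\n" for n in full_list_of_name_instances if "VOICEMAN" not in n))
-- ===== Notes on version B (the rewrite author's own statement) =====
-- stated objective: idiomatic
-- what changed: Replaces the imperative partition-into-lists plus two string-concatenation loops by a declarative filter-map-join expression: each group is obtained directly as ''.join over a filtered comprehension of the input, with no partition lists and no incremental string building.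
import Mathlib
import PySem

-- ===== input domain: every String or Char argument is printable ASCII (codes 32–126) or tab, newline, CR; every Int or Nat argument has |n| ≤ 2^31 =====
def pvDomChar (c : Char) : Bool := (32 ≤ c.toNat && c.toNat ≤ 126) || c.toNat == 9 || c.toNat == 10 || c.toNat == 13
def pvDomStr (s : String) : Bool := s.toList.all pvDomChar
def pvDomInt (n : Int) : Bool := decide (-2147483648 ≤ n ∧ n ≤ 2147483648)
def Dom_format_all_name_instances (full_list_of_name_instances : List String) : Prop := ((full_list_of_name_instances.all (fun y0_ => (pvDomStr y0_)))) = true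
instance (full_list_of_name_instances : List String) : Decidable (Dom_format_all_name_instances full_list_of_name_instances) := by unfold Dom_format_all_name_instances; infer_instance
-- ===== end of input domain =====

-- B replaces A's imperative partition lists and string-concatenation loops by a
-- declarative filter-map-join expression for each group (objective: idiomatic).

-- ===== PORT A =====
def format_all_name_instances (full_list_of_name_instances : List String) : String :=
  -- pass 1: partition into the two lists
  let part := full_list_of_name_instances.foldl
    (fun (acc : List String × List String) name_instance =>
      if PySem.Str.isIn "VOICEMAN" name_instance then (acc.1 ++ [name_instance], acc.2)
      else (acc.1, acc.2 ++ [name_instance]))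
    ([], [])
  -- pass 2: format the cutscene occurrences
  let formatter := part.1.foldl (fun f cutscene => f ++ " " ++ cutscene ++ "\n") ""
  let formatter := formatter ++ "\n"
  -- pass 3: format the mentioned characters
  part.2.foldl (fun f character => f ++ " " ++ character ++ "\n") formatter

-- ===== PORT B =====
-- ''.join of the formatted lines of a filtered comprehension, for each group
def format_all_name_instances_alt (full_list_of_name_instances : List String) : String :=
  String.join ((full_list_of_name_instances.filter
      (fun n => PySem.Str.isIn "VOICEMAN" n)).map (fun n => " " ++ n ++ "\n"))
  ++ "\n" ++
  String.join ((full_list_of_name_instances.filter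
      (fun n => !PySem.Str.isIn "VOICEMAN" n)).map (fun n => " " ++ n ++ "\n"))

-- ===== PRECONDITION & SPEC =====
def Spec_format_all_name_instances (full_list_of_name_instances : List String) (out : String) : Prop := out = format_all_name_instances_alt full_list_of_name_instances
instance (full_list_of_name_instances : List String) (out : String) : Decidable (Spec_format_all_name_instances full_list_of_name_instances out) := by unfold Spec_format_all_name_instances; infer_instance

-- ===== CLAIM (what is proved, stated in full; the proofs are below) =====
def Claim_equal_format_all_name_instances : Prop := ∀ (full_list_of_name_instances : List String), Dom_format_all_name_instances full_list_of_name_instances → Spec_format_all_name_instances full_list_of_name_instances (format_all_name_instances full_list_of_name_instances)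

-- ===== LEMMAS AND PROOFS =====

-- the formatting fold, from an arbitrary starting string, factors through ""
theorem fmt_foldl_shift (l : List String) (s : String) :
    l.foldl (fun f c => f ++ " " ++ c ++ "\n") s
      = s ++ l.foldl (fun f c => f ++ " " ++ c ++ "\n") "" := by
  induction l generalizing s with
  | nil => simp [List.foldl]
  | cons x xs ih =>
    simp only [List.foldl]
    rw [ih (s ++ " " ++ x ++ "\n"), ih ("" ++ " " ++ x ++ "\n")]
    simp [String.append_assoc]

-- the plain append fold behind String.join also shifts
theorem str_foldl_append_shift (l : List String) (s : String) :
    l.foldl (fun r t => r ++ t) s = s ++ l.foldl (fun r t => r ++ t) "" := by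
  induction l generalizing s with
  | nil => simp [List.foldl]
  | cons x xs ih =>
    simp only [List.foldl]
    rw [ih (s ++ x), ih ("" ++ x)]
    simp [String.append_assoc]

-- A's formatting fold is the join of the formatted lines
theorem fmt_foldl_join (l : List String) :
    l.foldl (fun f c => f ++ " " ++ c ++ "\n") ""
      = String.join (l.map (fun n => " " ++ n ++ "\n")) := by
  induction l with
  | nil => simp [List.foldl, String.join]
  | cons x xs ih =>
    simp only [List.foldl, List.map, String.join]
    rw [fmt_foldl_shift, ih]
    simp only [String.join, List.map_cons, List.foldl_cons]
    conv_rhs => rw [str_foldl_append_shift]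
    simp [String.append_assoc]

-- A's partition fold is the pair of filters
theorem partition_fold_filter (l : List String) (cl ml : List String) :
    l.foldl
      (fun (acc : List String × List String) n =>
        if PySem.Str.isIn "VOICEMAN" n then (acc.1 ++ [n], acc.2)
        else (acc.1, acc.2 ++ [n]))
      (cl, ml)
    = (cl ++ l.filter (fun n => PySem.Str.isIn "VOICEMAN" n),
       ml ++ l.filter (fun n => !PySem.Str.isIn "VOICEMAN" n)) := by
  induction l generalizing cl ml with
  | nil => simp
  | cons x xs ih =>
    simp only [List.foldl, List.filter_cons]
    by_cases h : PySem.Str.isIn "VOICEMAN" x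
    · rw [if_pos h, ih]
      simp only [h, Bool.not_true]
      simp
    · rw [Bool.not_eq_true] at h
      rw [if_neg (by simp only [h]; exact Bool.false_ne_true), ih]
      simp only [h, Bool.not_false]
      simp

-- ===== VERDICT (by name: the statement is the Claim_ definition above) =====
theorem format_all_name_instances_spec : Claim_equal_format_all_name_instances := by
  intro l _
  unfold Spec_format_all_name_instances format_all_name_instances format_all_name_instances_alt
  simp only []
  rw [partition_fold_filter]
  simp only [List.nil_append]
  rw [fmt_foldl_shift, fmt_foldl_join, fmt_foldl_join]
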